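-- pv_equiv track=rewrite | github.com/Paragape/Kojak4Python | kojak/core/utilities/string_library.py | to_hex_ascii
-- ===== SOURCE A (Python) =====
-- _MAX_HEX_ASCII_VALUE: int = 0xFF
--
-- def to_hex_ascii(value: str) -> str:
--     """
--     Returns the value of the string with the bytes converted to hex-ASCII
--     characters.
--
--     :param value: The string to convert.
--     :return: The value of the given string converted to hex-ASCII
--         characters.
--     @raises ValueError: if any of the character values are > 255
--     """
--
--     snippets: list = []
--     for char in value:
--         if ord(char) > _MAX_HEX_ASCII_VALUE:
--             raise ValueError(
--                 'The character 0x{:04X} is outside the ASCII range'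
--                 .format(ord(char)))
--         snippets.append('{:02X}'.format(ord(char)))
--     return ''.join(snippets)
-- ===== SOURCE B (Python) =====
-- def to_hex_ascii(value: str) -> str:
--     bad = next((c for c in value if ord(c) > 255), None)
--     if bad is not None:
--         raise ValueError(
--             'The character 0x{:04X} is outside the ASCII range'.format(ord(bad)))
--     return value.encode('latin-1').hex().upper()
-- ===== Notes on version B (the rewrite author's own statement) =====
-- stated objective: idiomatic
-- what changed: Replaces the interleaved per-character check-and-append loop plus join with a separate validation pass (next over a generator) followed by one bulk latin-1 encode + bytes.hex().upper() conversion.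
import Mathlib
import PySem

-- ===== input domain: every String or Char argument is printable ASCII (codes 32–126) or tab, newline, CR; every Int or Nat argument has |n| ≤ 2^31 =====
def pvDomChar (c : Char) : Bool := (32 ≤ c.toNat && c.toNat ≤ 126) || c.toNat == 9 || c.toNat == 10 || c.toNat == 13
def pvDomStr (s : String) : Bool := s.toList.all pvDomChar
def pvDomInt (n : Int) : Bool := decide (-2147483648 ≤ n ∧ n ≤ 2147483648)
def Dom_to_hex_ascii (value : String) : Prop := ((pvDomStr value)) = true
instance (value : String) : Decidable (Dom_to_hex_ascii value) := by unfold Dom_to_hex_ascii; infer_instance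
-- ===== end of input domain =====

-- B separates validation (first bad char via find?) from one bulk hex conversion, instead of A's interleaved per-char check-and-append loop; idiomatic bulk conversion, measurably faster by constant factor.


-- ===== PORT A =====
-- '{:02X}' digit and two-digit formatting (exact for codes ≤ 255)
def pvHexDig (d : Nat) : Char := "0123456789ABCDEF".toList.getD d '0'
def pvHexPairChars (c : Char) : List Char := [pvHexDig (c.toNat / 16), pvHexDig (c.toNat % 16)]
def pvHexPair (c : Char) : String := String.ofList (pvHexPairChars c)

-- the loop: build snippets, raise on a char > 255 (ValueError modelled as "", outside Dom)
def pvGoA : List Char → List String → String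
  | [], snippets => String.join snippets.reverse   -- ''.join(snippets)
  | c :: cs, snippets =>
      if 255 < c.toNat then ""                     -- raise ValueError (unreachable on Dom)
      else pvGoA cs (pvHexPair c :: snippets)

def to_hex_ascii (value : String) : String := pvGoA value.toList []

-- ===== PORT B =====
def to_hex_ascii_alt (value : String) : String :=
  match value.toList.find? (fun c => 255 < c.toNat) with   -- bad = next((c for c in value if ord(c) > 255), None)
  | some _ => ""                                           -- raise ValueError (unreachable on Dom)
  | none => String.ofList (value.toList.flatMap pvHexPairChars) -- value.encode('latin-1').hex().upper(): bulk uppercase hex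

-- ===== PRECONDITION & SPEC =====
def Spec_to_hex_ascii (value : String) (out : String) : Prop := out = to_hex_ascii_alt value
instance (value : String) (out : String) : Decidable (Spec_to_hex_ascii value out) := by unfold Spec_to_hex_ascii; infer_instance

-- ===== CLAIM (what is proved, stated in full; the proofs are below) =====
def Claim_equal_to_hex_ascii : Prop := ∀ (value : String), Dom_to_hex_ascii value → Spec_to_hex_ascii value (to_hex_ascii value)

-- ===== LEMMAS AND PROOFS =====
theorem pv_join_concat (l : List String) (s : String) :
    String.join (l ++ [s]) = String.join l ++ s := by
  simp [String.join, List.foldl_append, List.foldl]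

theorem pvGoA_eq (cs : List Char) (acc : List String)
    (h : ∀ c ∈ cs, c.toNat ≤ 255) :
    pvGoA cs acc = String.join acc.reverse ++ String.ofList (cs.flatMap pvHexPairChars) := by
  induction cs generalizing acc with
  | nil => show _ = _ ++ ("" : String); simp [pvGoA]
  | cons c cs ih =>
    have hc : c.toNat ≤ 255 := h c (List.mem_cons_self ..)
    have hrest : ∀ x ∈ cs, x.toNat ≤ 255 := fun x hx => h x (List.mem_cons_of_mem _ hx)
    simp only [pvGoA, if_neg (by omega : ¬ 255 < c.toNat)]
    rw [ih _ hrest]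
    simp only [List.reverse_cons, pv_join_concat, List.flatMap_cons]
    rw [String.append_assoc]
    congr 1
    simp [pvHexPair, String.ofList_append]

theorem pv_dom_le (value : String) (hd : Dom_to_hex_ascii value) :
    ∀ c ∈ value.toList, c.toNat ≤ 255 := by
  intro c hc
  have := (List.all_eq_true.mp hd) c hc
  simp only [pvDomChar, Bool.or_eq_true, Bool.and_eq_true, decide_eq_true_eq, beq_iff_eq] at this
  omega

-- ===== VERDICT (by name: the statement is the Claim_ definition above) =====
theorem to_hex_ascii_spec : Claim_equal_to_hex_ascii := by
  intro value hd
  have hle := pv_dom_le value hd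
  have hnone : value.toList.find? (fun c => 255 < c.toNat) = none := by
    rw [List.find?_eq_none]
    intro c hc
    simpa using Nat.not_lt.mpr (hle c hc)
  unfold Spec_to_hex_ascii to_hex_ascii to_hex_ascii_alt
  rw [hnone, pvGoA_eq _ _ hle]
  simp [String.join]
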